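-- pv_equiv track=rewrite | github.com/geordw/braids-project | peyl/tl.py | is_crossingless_matching
-- ===== SOURCE A (Python) =====
-- from typing import Iterable, Sequence
--
-- def is_crossingless_matching(seq: Sequence[int]) -> bool:
--     """Return True if seq is a crossingless matching of N points, where N = len(seq)."""
--     # Firstly, the sequence must be an involution of [0, N) with no fixed points.
--     if not all(
--         0 <= seq[i] < len(seq) and seq[i] != i and seq[seq[i]] == i
--         for i in range(len(seq))
--     ):
--         return False
--
--     # Secondly, the bracket sequence defined by the diagram must be balanced.
--     stack = []
--     for i in range(len(seq)):
--         if i < seq[i]: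
--             stack.append(seq[i])
--         else:
--             if stack.pop() != i:
--                 return False
--
--     return True
-- ===== SOURCE B (Python) =====
-- def is_crossingless_matching(seq) -> bool:
--     """Return True if seq is a crossingless matching of N points, where N = len(seq)."""
--     # Phase 1 (same as A): fixed-point-free involution of [0, N).
--     if not all(
--         0 <= seq[i] < len(seq) and seq[i] != i and seq[seq[i]] == i
--         for i in range(len(seq))
--     ):
--         return False
--
--     # Phase 2: direct non-crossing check — every partner inside an arc stays inside it.
--     for i in range(len(seq)):
--         j = seq[i]
--         if j > i:
--             for k in range(i + 1, j):
--                 if seq[k] < i or seq[k] > j: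
--                     return False
--     return True
-- ===== Notes on version B (the rewrite author's own statement) =====
-- stated objective: alternative
-- what changed: Phase 2 replaces A's single stack-balance pass by a direct non-crossing check: for each arc (i, seq[i]) scan the indices strictly inside it and fail if any partner escapes the arc; no stack is maintained.
import Mathlib
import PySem

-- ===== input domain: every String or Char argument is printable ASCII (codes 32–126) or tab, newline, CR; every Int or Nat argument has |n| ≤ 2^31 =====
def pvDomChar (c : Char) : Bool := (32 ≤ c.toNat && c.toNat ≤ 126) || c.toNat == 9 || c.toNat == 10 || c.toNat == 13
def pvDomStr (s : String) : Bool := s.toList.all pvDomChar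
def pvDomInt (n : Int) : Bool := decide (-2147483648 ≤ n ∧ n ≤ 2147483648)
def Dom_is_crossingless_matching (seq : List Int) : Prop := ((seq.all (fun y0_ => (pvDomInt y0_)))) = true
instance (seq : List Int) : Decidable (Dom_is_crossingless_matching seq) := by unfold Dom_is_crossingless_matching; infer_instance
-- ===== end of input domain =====

-- B replaces A's stack-balance pass by a per-arc interval scan (no stack); alternative algorithm, not faster.

-- ===== PORT A =====
-- Phase 1, textually identical in both Pythons: fixed-point-free involution of [0, N).
def pvInvolAll (seq : List Int) : Bool :=
  (List.range seq.length).all (fun i =>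
    match PySem.List.pyGet? seq (i : Int) with
    | none => false
    | some v =>
        decide (0 ≤ v) && decide (v < (seq.length : Int)) && decide (v ≠ (i : Int)) &&
          (PySem.List.pyGet? seq v == some (i : Int)))

-- A's stack pass; the stack top is the list head.  After pvInvolAll succeeds the
-- pop-from-empty branch (a Python IndexError) is unreachable, so its 'false' is never used.
def pvStackLoop (seq : List Int) (i : Nat) (stack : List Int) : Bool :=
  if _h : i < seq.length then
    match PySem.List.pyGet? seq (i : Int) with
    | none => false
    | some v =>
      if (i : Int) < v then pvStackLoop seq (i + 1) (v :: stack)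
      else
        match stack with
        | [] => false
        | t :: rest => if t = (i : Int) then pvStackLoop seq (i + 1) rest else false
  else true
termination_by seq.length - i

def is_crossingless_matching (seq : List Int) : Bool :=
  if pvInvolAll seq then pvStackLoop seq 0 [] else false

-- ===== PORT B =====
-- B's inner scan for the arc starting at i: every partner inside (i, seq[i]) stays inside.
def pvArcOK (seq : List Int) (i : Nat) : Bool :=
  match PySem.List.pyGet? seq (i : Int) with
  | none => false
  | some j =>
    if j > (i : Int) then
      (PySem.List.pyRange ((i : Int) + 1) j 1).all (fun k =>
        match PySem.List.pyGet? seq k with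
        | none => false
        | some v => !(decide (v < (i : Int)) || decide (v > j)))
    else true

def is_crossingless_matching_alt (seq : List Int) : Bool :=
  if pvInvolAll seq then (List.range seq.length).all (pvArcOK seq) else false

-- ===== PRECONDITION & SPEC =====
def Spec_is_crossingless_matching (seq : List Int) (out : Bool) : Prop := out = is_crossingless_matching_alt seq
instance (seq : List Int) (out : Bool) : Decidable (Spec_is_crossingless_matching seq out) := by unfold Spec_is_crossingless_matching; infer_instance

-- ===== CLAIM (what is proved, stated in full; the proofs are below) =====
def Claim_equal_is_crossingless_matching : Prop := ∀ (seq : List Int), Dom_is_crossingless_matching seq → Spec_is_crossingless_matching seq (is_crossingless_matching seq)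

-- ===== LEMMAS AND PROOFS =====

-- the partner function read off the list (meaningful under PvInv)
def pvG (seq : List Int) (i : Nat) : Nat := (seq.getD i 0).toNat

def PvInv (seq : List Int) : Prop :=
  ∀ i, i < seq.length →
    seq.getD i 0 = (pvG seq i : Int) ∧ pvG seq i < seq.length ∧ pvG seq i ≠ i ∧
      pvG seq (pvG seq i) = i

-- the stack A's loop holds before step i, on a crossingless prefix (top = head)
def pvS (seq : List Int) (i : Nat) : List Int :=
  (((List.range i).filter (fun j => decide (i ≤ pvG seq j))).reverse).map
    (fun j => ((pvG seq j : Nat) : Int))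

def pvOk (seq : List Int) (c : Nat) : Prop := ∀ j, pvG seq c < j → j < c → pvG seq j < c

def pvAllOk (seq : List Int) (i : Nat) : Prop :=
  ∀ c, i ≤ c → c < seq.length → pvG seq c < c → pvOk seq c

def pvNC (seq : List Int) : Prop :=
  ∀ i, i < seq.length → i < pvG seq i →
    ∀ k, i < k → k < pvG seq i → i ≤ pvG seq k ∧ pvG seq k ≤ pvG seq i

lemma pv_getD (seq : List Int) (i : Nat) (hi : i < seq.length) :
    seq.getD i 0 = seq[i] := by
  simp [List.getD, List.getElem?_eq_getElem hi]

lemma pv_inv_of_all (seq : List Int) (h : pvInvolAll seq = true) : PvInv seq := by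
  intro i hi
  unfold pvInvolAll at h
  rw [List.all_eq_true] at h
  have hx := h i (List.mem_range.mpr hi)
  rw [PySem.List.pyGet?_natCast, List.getElem?_eq_getElem hi] at hx
  simp only [Bool.and_eq_true, decide_eq_true_eq, beq_iff_eq] at hx
  obtain ⟨⟨⟨h0, h1⟩, h2⟩, h3⟩ := hx
  have htn : seq[i].toNat < seq.length := by omega
  rw [show seq[i] = ((seq[i].toNat : Nat) : Int) from by omega, PySem.List.pyGet?_natCast,
    List.getElem?_eq_getElem htn] at h3
  have hv : (seq[i].toNat : Int) = seq[i] := Int.toNat_of_nonneg h0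
  have hg : pvG seq i = seq[i].toNat := by rw [pvG, pv_getD seq i hi]
  have h3' : seq[seq[i].toNat] = (i : Int) := Option.some_inj.mp h3
  refine ⟨?_, by omega, by omega, ?_⟩
  · rw [pv_getD seq i hi, hg, hv]
  · rw [hg, pvG, pv_getD seq _ htn, h3']
    simp

lemma pv_get (seq : List Int) (hInv : PvInv seq) (i : Nat) (hi : i < seq.length) :
    PySem.List.pyGet? seq (i : Int) = some ((pvG seq i : Nat) : Int) := by
  rw [PySem.List.pyGet?_natCast, List.getElem?_eq_getElem hi]
  exact congrArg some (by rw [← pv_getD seq i hi, (hInv i hi).1])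

lemma pv_gne (seq : List Int) (hInv : PvInv seq) {i j : Nat} (hi : i < seq.length)
    (hj : j < seq.length) (hne : j ≠ pvG seq i) : pvG seq j ≠ i := by
  intro he
  have h2 := (hInv j hj).2.2.2
  rw [he] at h2
  exact hne h2.symm

lemma pv_step_open (seq : List Int) (hInv : PvInv seq) (i : Nat) (hi : i < seq.length)
    (ho : i < pvG seq i) : pvS seq (i + 1) = ((pvG seq i : Nat) : Int) :: pvS seq i := by
  have hcong : ∀ j ∈ List.range i, (decide (i + 1 ≤ pvG seq j)) = (decide (i ≤ pvG seq j)) := by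
    intro j hj
    rw [List.mem_range] at hj
    have hne : pvG seq j ≠ i :=
      pv_gne seq hInv hi (by omega) (by omega)
    exact decide_eq_decide.mpr (by omega)
  unfold pvS
  rw [List.range_succ, List.filter_append, List.filter_congr hcong,
    List.filter_cons_of_pos (by simpa using ho), List.filter_nil, List.reverse_append,
    List.reverse_cons, List.reverse_nil, List.nil_append, List.singleton_append, List.map_cons]

lemma pv_mid_nil (seq : List Int) (P : Nat → Bool) (gi b : Nat)
    (hP : ∀ j, gi < j → j < gi + 1 + b → P j = false) :
    ((List.range b).map (fun x => gi + 1 + x)).filter P = [] := by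
  rw [List.filter_eq_nil_iff]
  intro x hx
  rw [List.mem_map] at hx
  obtain ⟨t, ht, rfl⟩ := hx
  rw [List.mem_range] at ht
  intro hPx
  rw [hP (gi + 1 + t) (by omega) (by omega)] at hPx
  exact absurd hPx (by simp)

lemma pv_step_close (seq : List Int) (hInv : PvInv seq) (i : Nat) (hi : i < seq.length)
    (hc : pvG seq i < i) (hok : pvOk seq i) :
    pvS seq i = (i : Int) :: pvS seq (i + 1) := by
  have hgg : pvG seq (pvG seq i) = i := (hInv i hi).2.2.2
  obtain ⟨b, hb⟩ : ∃ b, i = (pvG seq i + 1) + b := ⟨i - (pvG seq i + 1), by omega⟩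
  have hmid : ∀ j, pvG seq i < j → j < pvG seq i + 1 + b → (decide (i ≤ pvG seq j)) = false := by
    intro j h1 h2
    have := hok j h1 (by omega)
    simpa using by omega
  have hmid' : ∀ j, pvG seq i < j → j < pvG seq i + 1 + b → (decide (i + 1 ≤ pvG seq j)) = false := by
    intro j h1 h2
    have := hok j h1 (by omega)
    simpa using by omega
  have hcong : ∀ j ∈ List.range (pvG seq i), (decide (i + 1 ≤ pvG seq j)) = (decide (i ≤ pvG seq j)) := by
    intro j hj
    rw [List.mem_range] at hj
    have hne : pvG seq j ≠ i := pv_gne seq hInv hi (by omega) (by omega)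
    exact decide_eq_decide.mpr (by omega)
  have hrange : List.range i
      = List.range (pvG seq i + 1) ++ (List.range b).map (fun x => pvG seq i + 1 + x) := by
    conv_lhs => rw [hb]
    exact List.range_add
  have hSi : (List.range i).filter (fun j => decide (i ≤ pvG seq j))
      = (List.range (pvG seq i)).filter (fun j => decide (i ≤ pvG seq j)) ++ [pvG seq i] := by
    rw [hrange, List.filter_append, pv_mid_nil seq _ _ _ hmid, List.append_nil,
      List.range_succ, List.filter_append]
    congr 1
    simp [hgg]
  have hSi1 : (List.range (i + 1)).filter (fun j => decide (i + 1 ≤ pvG seq j))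
      = (List.range (pvG seq i)).filter (fun j => decide (i ≤ pvG seq j)) := by
    rw [List.range_succ, List.filter_append]
    have hlast : [i].filter (fun j => decide (i + 1 ≤ pvG seq j)) = [] := by simp; omega
    rw [hlast, List.append_nil]
    rw [hrange, List.filter_append, pv_mid_nil seq _ _ _ hmid', List.append_nil,
      List.range_succ, List.filter_append]
    have hgi : [pvG seq i].filter (fun j => decide (i + 1 ≤ pvG seq j)) = [] := by
      simp [hgg]
    rw [hgi, List.append_nil, List.filter_congr hcong]
  unfold pvS
  rw [hSi, hSi1, List.reverse_append]
  simp [hgg]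

lemma pv_head_filter {α : Type} (p : α → Bool) :
    ∀ l : List α, (l.filter p).head? = l.find? p := by
  intro l
  induction l with
  | nil => simp
  | cons a l ih =>
    by_cases hp : p a = true <;> simp [List.filter_cons, List.find?_cons, hp, ih]

lemma pv_find_rev_range (p : Nat → Bool) :
    ∀ i x, (List.range i).reverse.find? p = some x →
      p x = true ∧ x < i ∧ ∀ y, x < y → y < i → p y = false := by
  intro i
  induction i with
  | zero => intro x hx; simp at hx
  | succ n ih =>
    intro x hx
    rw [List.range_succ, List.reverse_append, List.reverse_singleton, List.singleton_append] at hx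
    by_cases hp : p n = true
    · rw [List.find?_cons_of_pos hp] at hx
      obtain rfl : n = x := by simpa using hx
      exact ⟨hp, by omega, fun y h1 h2 => by omega⟩
    · rw [List.find?_cons_of_neg (by simpa using hp)] at hx
      obtain ⟨h1, h2, h3⟩ := ih x hx
      refine ⟨h1, by omega, fun y hy1 hy2 => ?_⟩
      by_cases hyn : y = n
      · subst hyn; simpa using hp
      · exact h3 y hy1 (by omega)

lemma pv_step_bad (seq : List Int) (hInv : PvInv seq) (i : Nat) (hi : i < seq.length)
    (hc : pvG seq i < i) (hbad : ¬ pvOk seq i) :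
    ∃ t rest, pvS seq i = t :: rest ∧ t ≠ (i : Int) := by
  unfold pvOk at hbad
  push_neg at hbad
  obtain ⟨j, hj1, hj2, hj3⟩ := hbad
  have hmemj : j ∈ (List.range i).reverse := by
    rw [List.mem_reverse, List.mem_range]; exact hj2
  obtain ⟨x, hx⟩ : ∃ x, (List.range i).reverse.find? (fun j => decide (i ≤ pvG seq j)) = some x := by
    cases hfe : (List.range i).reverse.find? (fun j => decide (i ≤ pvG seq j)) with
    | none =>
      have := List.find?_eq_none.mp hfe j hmemj
      simp at this; omega
    | some x => exact ⟨x, rfl⟩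
  obtain ⟨hpx, hxlt, hmax⟩ := pv_find_rev_range _ i x hx
  have hxge : i ≤ pvG seq x := by simpa using hpx
  have hxne : x ≠ pvG seq i := by
    intro he
    have := hmax j (by omega) hj2
    simp at this; omega
  have hgx : pvG seq x ≠ i := pv_gne seq hInv hi (by omega) hxne
  unfold pvS
  rw [← List.filter_reverse]
  cases hL : ((List.range i).reverse.filter fun j => decide (i ≤ pvG seq j)) with
  | nil =>
    have := pv_head_filter (fun j => decide (i ≤ pvG seq j)) (List.range i).reverse
    rw [hL, hx] at this
    simp at this
  | cons a t =>
    have ha : a = x := by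
      have := pv_head_filter (fun j => decide (i ≤ pvG seq j)) (List.range i).reverse
      rw [hL, hx] at this
      simpa using this
    have hga : pvG seq a ≠ i := by rw [ha]; exact hgx
    exact ⟨((pvG seq a : Nat) : Int), t.map (fun j => ((pvG seq j : Nat) : Int)), rfl,
      by exact_mod_cast hga⟩

lemma pvStackLoop_step (seq : List Int) (i : Nat) (stack : List Int) (hi : i < seq.length)
    (v : Int) (hv : PySem.List.pyGet? seq (i : Int) = some v) :
    pvStackLoop seq i stack =
      if (i : Int) < v then pvStackLoop seq (i + 1) (v :: stack)
      else match stack with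
        | [] => false
        | t :: rest => if t = (i : Int) then pvStackLoop seq (i + 1) rest else false := by
  conv_lhs => rw [pvStackLoop.eq_def]
  rw [dif_pos hi, hv]

lemma pvStackLoop_end (seq : List Int) (i : Nat) (stack : List Int) (hi : ¬ i < seq.length) :
    pvStackLoop seq i stack = true := by
  conv_lhs => rw [pvStackLoop.eq_def]
  rw [dif_neg hi]

lemma pv_allok_succ_open (seq : List Int) (i : Nat) (ho : i < pvG seq i) :
    pvAllOk seq (i + 1) ↔ pvAllOk seq i := by
  constructor
  · intro h c hc1 hc2 hc3
    rcases Nat.eq_or_lt_of_le hc1 with rfl | h'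
    · omega
    · exact h c h' hc2 hc3
  · intro h c hc1 hc2 hc3
    exact h c (by omega) hc2 hc3

lemma pv_allok_succ_close (seq : List Int) (i : Nat) (hi : i < seq.length)
    (hc : pvG seq i < i) (hok : pvOk seq i) :
    pvAllOk seq (i + 1) ↔ pvAllOk seq i := by
  constructor
  · intro h c hc1 hc2 hc3
    rcases Nat.eq_or_lt_of_le hc1 with rfl | h'
    · exact hok
    · exact h c h' hc2 hc3
  · intro h c hc1 hc2 hc3
    exact h c (by omega) hc2 hc3

lemma pv_stack_iff (seq : List Int) (hInv : PvInv seq) :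
    ∀ m i, i ≤ seq.length → seq.length - i = m →
      (pvStackLoop seq i (pvS seq i) = true ↔ pvAllOk seq i) := by
  intro m
  induction m with
  | zero =>
    intro i hle hm
    rw [pvStackLoop_end seq i _ (by omega)]
    constructor
    · intro _ c hc1 hc2 hc3
      omega
    · intro _; rfl
  | succ m ih =>
    intro i hle hm
    have hi : i < seq.length := by omega
    obtain ⟨hval, hgn, hne, hinv2⟩ := hInv i hi
    rw [pvStackLoop_step seq i _ hi _ (pv_get seq hInv i hi)]
    by_cases hio : i < pvG seq i
    · rw [if_pos (by exact_mod_cast hio)]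
      rw [← pv_step_open seq hInv i hi hio]
      rw [ih (i + 1) (by omega) (by omega)]
      exact pv_allok_succ_open seq i hio
    · have hic : pvG seq i < i := by omega
      rw [if_neg (by exact_mod_cast hio)]
      by_cases hok : pvOk seq i
      · rw [pv_step_close seq hInv i hi hic hok]
        show (if (i : Int) = (i : Int) then pvStackLoop seq (i + 1) (pvS seq (i + 1)) else false) = true ↔ _
        rw [if_pos rfl, ih (i + 1) (by omega) (by omega)]
        exact pv_allok_succ_close seq i hi hic hok
      · obtain ⟨t, rest, hS, hne'⟩ := pv_step_bad seq hInv i hi hic hok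
        rw [hS]
        show (if t = (i : Int) then pvStackLoop seq (i + 1) rest else false) = true ↔ _
        rw [if_neg hne']
        constructor
        · intro h; exact absurd h (by simp)
        · intro hAll; exact absurd (hAll i (le_refl i) hi hic) hok

lemma pv_allok_iff_nc (seq : List Int) (hInv : PvInv seq) :
    pvAllOk seq 0 ↔ pvNC seq := by
  constructor
  · intro h i hi hio k hk1 hk2
    have hgi : pvG seq i < seq.length := (hInv i hi).2.1
    have hggi : pvG seq (pvG seq i) = i := (hInv i hi).2.2.2
    have hkn : k < seq.length := by omega
    have hok := h (pvG seq i) (Nat.zero_le _) hgi (by rw [hggi]; exact hio)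
    have h2 : pvG seq k < pvG seq i := hok k (by rw [hggi]; exact hk1) hk2
    refine ⟨?_, le_of_lt h2⟩
    by_contra hlt
    push_neg at hlt
    have hok2 := h k (Nat.zero_le _) hkn (by omega)
    have := hok2 i hlt hk1
    omega
  · intro h c _ hc hcc j hj1 hj2
    have hgc : pvG seq c < seq.length := by omega
    have hggc : pvG seq (pvG seq c) = c := (hInv c hc).2.2.2
    have hnc := h (pvG seq c) hgc (by rw [hggc]; exact hcc) j hj1 (by rw [hggc]; exact hj2)
    obtain ⟨h1, h2⟩ := hnc
    rw [hggc] at h2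
    have hne : pvG seq j ≠ c := pv_gne seq hInv hc (by omega) (by omega)
    omega

lemma pvArcOK_eq (seq : List Int) (hInv : PvInv seq) (i : Nat) (hi : i < seq.length) :
    pvArcOK seq i =
      if ((pvG seq i : Nat) : Int) > (i : Int) then
        (PySem.List.pyRange ((i : Int) + 1) ((pvG seq i : Nat) : Int) 1).all (fun k =>
          match PySem.List.pyGet? seq k with
          | none => false
          | some v => !(decide (v < (i : Int)) || decide (v > ((pvG seq i : Nat) : Int))))
      else true := by
  unfold pvArcOK
  rw [pv_get seq hInv i hi]

lemma pv_arcs_iff_nc (seq : List Int) (hInv : PvInv seq) :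
    (List.range seq.length).all (pvArcOK seq) = true ↔ pvNC seq := by
  rw [List.all_eq_true]
  constructor
  · intro h i hi hio k hk1 hk2
    have hx := h i (List.mem_range.mpr hi)
    rw [pvArcOK_eq seq hInv i hi, if_pos (by exact_mod_cast hio), List.all_eq_true] at hx
    have hmem : ((k : Nat) : Int) ∈ PySem.List.pyRange ((i : Int) + 1) ((pvG seq i : Nat) : Int) 1 :=
      PySem.List.mem_pyRange_one.mpr ⟨by omega, by omega⟩
    have hkx := hx _ hmem
    have hkn : k < seq.length := by
      have : pvG seq i < seq.length := (hInv i hi).2.1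
      omega
    rw [pv_get seq hInv k hkn] at hkx
    simp at hkx
    omega
  · intro h j hj
    rw [List.mem_range] at hj
    rw [pvArcOK_eq seq hInv j hj]
    by_cases hio : j < pvG seq j
    · rw [if_pos (by exact_mod_cast hio), List.all_eq_true]
      intro x hxmem
      rw [PySem.List.mem_pyRange_one] at hxmem
      obtain ⟨hx1, hx2⟩ := hxmem
      have hxk : x = ((x.toNat : Nat) : Int) := by omega
      have hkn : x.toNat < seq.length := by
        have : pvG seq j < seq.length := (hInv j hj).2.1
        omega
      rw [hxk, pv_get seq hInv x.toNat hkn]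
      have hnc := h j hj hio x.toNat (by omega) (by omega)
      simp
      omega
    · rw [if_neg (by exact_mod_cast hio)]

-- ===== VERDICT (by name: the statement is the Claim_ definition above) =====
theorem is_crossingless_matching_spec : Claim_equal_is_crossingless_matching := by
  intro seq _
  unfold Spec_is_crossingless_matching is_crossingless_matching is_crossingless_matching_alt
  by_cases h : pvInvolAll seq = true
  · simp only [h, if_true]
    have hInv := pv_inv_of_all seq h
    have h1 : pvStackLoop seq 0 (pvS seq 0) = true ↔ pvAllOk seq 0 :=
      pv_stack_iff seq hInv (seq.length - 0) 0 (Nat.zero_le _) rfl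
    have h0 : pvS seq 0 = [] := by simp [pvS]
    rw [h0] at h1
    have h2 := pv_allok_iff_nc seq hInv
    have h3 := pv_arcs_iff_nc seq hInv
    cases hA : pvStackLoop seq 0 []
    · cases hB : (List.range seq.length).all (pvArcOK seq)
      · rfl
      · exact absurd (h1.mpr (h2.mpr (h3.mp hB))) (by simp [hA])
    · exact (h3.mpr (h2.mp (h1.mp hA))).symm
  · simp [h]
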